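-- pv_equiv track=rewrite | github.com/neulab/ExplainaBoard | explainaboard/utils/analysis.py | interval_transformer
-- ===== SOURCE A (Python) =====
-- def interval_transformer(inter_list):
--     dict_old2new = {}
--     last = 0
--     for ind, interval in enumerate(inter_list):
--         if ind == 0:
--             last = interval[0]
--         if len(interval) == 1:
--             # new_inter_list.append(interval)
--             dict_old2new[interval] = interval
--             last = interval[0]
--         else:
--             # new_inter_list.append((last, interval[1]))
--             dict_old2new[interval] = (last, interval[1])
--             last = interval[1]
--     return dict_old2new
-- ===== SOURCE B (Python) =====
-- def interval_transformer(inter_list):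
--     def prev_boundary(ind, interval):
--         if ind == 0:
--             return interval[0]
--         prev = inter_list[ind - 1]
--         return prev[0] if len(prev) == 1 else prev[1]
--     return {
--         interval: (interval if len(interval) == 1
--                    else (prev_boundary(ind, interval), interval[1]))
--         for ind, interval in enumerate(inter_list)
--     }
-- ===== Notes on version B (the rewrite author's own statement) =====
-- stated objective: alternative
-- what changed: Replaced the stateful loop threading a mutable running `last` boundary through a dict with a dict comprehension whose value for each interval is computed independently from its predecessor interval via a helper prev_boundary(ind, interval).
import Mathlib
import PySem

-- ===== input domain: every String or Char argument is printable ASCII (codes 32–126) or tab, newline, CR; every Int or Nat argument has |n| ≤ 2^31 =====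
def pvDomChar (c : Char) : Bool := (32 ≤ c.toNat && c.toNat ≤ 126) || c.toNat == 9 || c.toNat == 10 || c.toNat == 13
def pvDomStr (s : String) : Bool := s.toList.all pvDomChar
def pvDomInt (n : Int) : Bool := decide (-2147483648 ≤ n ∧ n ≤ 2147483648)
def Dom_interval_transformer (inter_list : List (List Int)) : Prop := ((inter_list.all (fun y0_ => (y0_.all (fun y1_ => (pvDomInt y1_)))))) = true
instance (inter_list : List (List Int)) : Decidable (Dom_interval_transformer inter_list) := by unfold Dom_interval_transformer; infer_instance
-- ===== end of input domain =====

-- B replaces A's mutable running `last` accumulator by computing each interval's adjusted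
-- left boundary independently from its predecessor interval (objective: alternative decomposition).

-- ===== PORT A =====
-- Literal port of A: fold over enumerate carrying (dict, last); pyGetD with default 0 is
-- exact under Pre_ (all indexed accesses are in range there).
def interval_transformer (inter_list : List (List Int)) : List (List Int × List Int) :=
  (((PySem.List.enumerate inter_list).foldl
      (fun (st : PySem.Dict (List Int) (List Int) × Int) p =>
        let d := st.1
        let last := if p.1 == 0 then PySem.List.pyGetD p.2 0 0 else st.2
        if p.2.length == 1 then
          (d.insert p.2 p.2, PySem.List.pyGetD p.2 0 0)
        else
          (d.insert p.2 [last, PySem.List.pyGetD p.2 1 0], PySem.List.pyGetD p.2 1 0))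
      (PySem.Dict.empty, 0)).1).items

-- ===== PORT B =====
-- prev_boundary(ind, interval) from Source B
def itPrevBoundary (inter_list : List (List Int)) (ind : Int) (interval : List Int) : Int :=
  if ind == 0 then PySem.List.pyGetD interval 0 0
  else
    let prev := PySem.List.pyGetD inter_list (ind - 1) []
    if prev.length == 1 then PySem.List.pyGetD prev 0 0 else PySem.List.pyGetD prev 1 0

-- dict comprehension over enumerate(inter_list)
def interval_transformer_alt (inter_list : List (List Int)) : List (List Int × List Int) :=
  ((PySem.List.enumerate inter_list).foldl
      (fun (d : PySem.Dict (List Int) (List Int)) p =>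
        d.insert p.2 (if p.2.length == 1 then p.2
          else [itPrevBoundary inter_list p.1 p.2, PySem.List.pyGetD p.2 1 0]))
      PySem.Dict.empty).items

-- ===== PRECONDITION & SPEC =====
-- Pre_ excludes exactly the inputs containing an empty interval, on which Python A raises IndexError.
def Pre_interval_transformer (inter_list : List (List Int)) : Prop :=
  ∀ iv ∈ inter_list, iv ≠ []
instance (inter_list : List (List Int)) : Decidable (Pre_interval_transformer inter_list) := by unfold Pre_interval_transformer; infer_instance
def pvWitness_interval_transformer : List (List Int) := [[1, 3], [4], [5, 9]]

def Spec_interval_transformer (inter_list : List (List Int)) (out : List (List Int × List Int)) : Prop := out = interval_transformer_alt inter_list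
instance (inter_list : List (List Int)) (out : List (List Int × List Int)) : Decidable (Spec_interval_transformer inter_list out) := by unfold Spec_interval_transformer; infer_instance

-- ===== CLAIM (what is proved, stated in full; the proofs are below) =====
def Claim_equal_interval_transformer : Prop := ∀ (inter_list : List (List Int)), Dom_interval_transformer inter_list → Pre_interval_transformer inter_list → Spec_interval_transformer inter_list (interval_transformer inter_list)

-- ===== LEMMAS AND PROOFS =====

-- the running `last` value after a (nonempty) processed prefix ending in `iv`
def itBoundary (iv : List Int) : Int :=
  if iv.length == 1 then PySem.List.pyGetD iv 0 0 else PySem.List.pyGetD iv 1 0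

lemma pyGetD_append_pred (pre ys : List (List Int)) (h : pre ≠ []) :
    PySem.List.pyGetD (pre ++ ys) ((pre.length : Int) - 1) [] = pre.getLastD [] := by
  have hlen : 1 ≤ pre.length := List.length_pos_iff.mpr h
  have : ((pre.length : Int) - 1) = ((pre.length - 1 : Nat) : Int) := by omega
  rw [this, PySem.List.pyGetD_natCast]
  rw [List.getD_eq_getElem?_getD, List.getElem?_append_left (by omega)]
  rw [List.getLastD_eq_getLast?, List.getLast?_eq_getElem?]

lemma it_main (suf : List (List Int)) : ∀ (pre : List (List Int))
    (d : PySem.Dict (List Int) (List Int)) (last : Int),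
    (pre ≠ [] → last = itBoundary (pre.getLastD [])) →
    ((PySem.List.enumerate suf (pre.length)).foldl
      (fun (st : PySem.Dict (List Int) (List Int) × Int) p =>
        let d := st.1
        let last := if p.1 == 0 then PySem.List.pyGetD p.2 0 0 else st.2
        if p.2.length == 1 then
          (d.insert p.2 p.2, PySem.List.pyGetD p.2 0 0)
        else
          (d.insert p.2 [last, PySem.List.pyGetD p.2 1 0], PySem.List.pyGetD p.2 1 0))
      (d, last)).1
    = (PySem.List.enumerate suf (pre.length)).foldl
      (fun (d : PySem.Dict (List Int) (List Int)) p =>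
        d.insert p.2 (if p.2.length == 1 then p.2
          else [itPrevBoundary (pre ++ suf) p.1 p.2, PySem.List.pyGetD p.2 1 0]))
      d := by
  induction suf with
  | nil => intro pre d last _; simp [PySem.List.enumerate_nil]
  | cons interval rest ih =>
    intro pre d last hlast
    rw [PySem.List.enumerate_cons, List.foldl_cons, List.foldl_cons]
    have hused : (if ((pre.length : Int) == 0) then PySem.List.pyGetD interval 0 0 else last)
        = itPrevBoundary (pre ++ interval :: rest) (pre.length) interval := by
      unfold itPrevBoundary
      by_cases hp : pre = []
      · subst hp; simp
      · have h0 : ((pre.length : Int) == 0) = false := by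
          have := List.length_pos_iff.mpr hp
          simp; omega
        rw [h0]
        simp only [Bool.false_eq_true, if_false]
        rw [pyGetD_append_pred pre (interval :: rest) hp]
        rw [hlast hp]
        unfold itBoundary
        rfl
    have harg : ∀ (pre' : List (List Int)), pre' = pre ++ [interval] →
        pre' ++ rest = pre ++ interval :: rest := by
      intro pre' h; subst h; simp
    by_cases hlen : interval.length == 1
    · simp only [hlen, if_true]
      have := ih (pre ++ [interval]) (d.insert interval interval)
        (PySem.List.pyGetD interval 0 0)
        (by intro _; simp [itBoundary, hlen])
      simp only [List.length_append, List.length_cons, List.length_nil,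
        harg (pre ++ [interval]) rfl] at this ⊢
      rw [show pre.length + 1 = pre.length + (0 + 1) by omega] at this
      exact this
    · simp only [hlen, hused]
      have := ih (pre ++ [interval])
        (d.insert interval [itPrevBoundary (pre ++ interval :: rest) (pre.length) interval,
          PySem.List.pyGetD interval 1 0])
        (PySem.List.pyGetD interval 1 0)
        (by intro _; simp [itBoundary, hlen])
      simp only [List.length_append, List.length_cons, List.length_nil,
        harg (pre ++ [interval]) rfl] at this ⊢
      rw [show pre.length + 1 = pre.length + (0 + 1) by omega] at this
      exact this

-- ===== VERDICT (by name: the statement is the Claim_ definition above) =====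
theorem interval_transformer_spec : Claim_equal_interval_transformer := by
  intro inter_list _ _
  unfold Spec_interval_transformer interval_transformer interval_transformer_alt
  have := it_main inter_list [] PySem.Dict.empty 0 (by intro h; exact absurd rfl h)
  simpa using congrArg PySem.Dict.items this
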